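-- pv_equiv track=rewrite | github.com/kdcube/kdcube-ai-app | app/ai-app/src/kdcube-ai-app/kdcube_ai_app/apps/chat/sdk/solutions/widgets/canvas.py | _sources_signature
-- ===== SOURCE A (Python) =====
-- from typing import Awaitable, Callable, Dict, List, Optional, Any
--
-- def _sources_signature(sources_list: List[Dict[str, object]]) -> tuple[int, int, int]:
--     if not sources_list:
--         return (0, 0, 0)
--     sids: List[int] = []
--     for row in sources_list:
--         if not isinstance(row, dict):
--             continue
--         try:
--             sid = int(row.get("sid") or 0)
--         except Exception:
--             sid = 0
--         if sid > 0:
--             sids.append(sid)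
--     if not sids:
--         return (0, 0, 0)
--     return (len(sids), min(sids), max(sids))
-- ===== SOURCE B (Python) =====
-- def _sources_signature(sources_list):
--     if not sources_list:
--         return (0, 0, 0)
--     count = 0
--     cur_min = None
--     cur_max = None
--     for row in sources_list:
--         if not isinstance(row, dict):
--             continue
--         try:
--             sid = int(row.get("sid") or 0)
--         except Exception:
--             sid = 0
--         if sid > 0:
--             count += 1
--             if cur_min is None or sid < cur_min:
--                 cur_min = sid
--             if cur_max is None or sid > cur_max:
--                 cur_max = sid
--     if count == 0:
--         return (0, 0, 0)
--     return (count, cur_min, cur_max)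
-- ===== Notes on version B (the rewrite author's own statement) =====
-- stated objective: alternative
-- what changed: B replaces A's collect-the-sids-into-a-list-then-len/min/max with a single pass maintaining a running count and running min/max, using no intermediate list.
import Mathlib
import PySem

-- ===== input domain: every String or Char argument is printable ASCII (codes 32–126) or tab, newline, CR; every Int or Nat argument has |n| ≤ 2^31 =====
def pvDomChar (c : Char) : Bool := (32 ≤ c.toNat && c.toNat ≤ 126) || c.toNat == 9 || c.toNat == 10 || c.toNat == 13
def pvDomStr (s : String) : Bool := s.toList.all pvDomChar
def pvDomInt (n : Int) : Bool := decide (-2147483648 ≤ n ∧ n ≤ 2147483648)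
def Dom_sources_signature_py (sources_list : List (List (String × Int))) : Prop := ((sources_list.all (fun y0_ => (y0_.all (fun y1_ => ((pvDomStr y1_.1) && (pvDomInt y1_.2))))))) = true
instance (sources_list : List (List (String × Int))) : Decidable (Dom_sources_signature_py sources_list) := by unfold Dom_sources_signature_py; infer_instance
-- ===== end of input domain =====

-- B: single pass maintaining running count/min/max instead of collecting the valid sids into a list and taking len/min/max ("alternative"; equal return value).


-- ===== PORT A =====
-- `int(row.get("sid") or 0)`: values are Int, so `or 0` only maps a missing/0 value to 0
-- (= getD 0) and `int` is the identity and never raises (the `except` branch is dead here).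
def sidOfRow (row : List (String × Int)) : Int :=
  ((PySem.Dict.mk row).get? "sid").getD 0

def sources_signature_py (sources_list : List (List (String × Int))) : Int × Int × Int :=
  if sources_list = [] then (0, 0, 0)
  else
    let sids : List Int := sources_list.foldl
      (fun acc row =>
        let sid := sidOfRow row
        if sid > 0 then acc ++ [sid] else acc) []
    if sids = [] then (0, 0, 0)
    else
      match PySem.List.min? sids (fun x => x), PySem.List.max? sids (fun x => x) with
      | some mn, some mx => ((sids.length : Int), mn, mx)
      | _, _ => (0, 0, 0)   -- unreachable: sids ≠ []

-- ===== PORT B =====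
def altStep (st : Int × Option Int × Option Int) (row : List (String × Int)) :
    Int × Option Int × Option Int :=
  let sid := sidOfRow row
  if sid > 0 then
    (st.1 + 1,
     some (match st.2.1 with | none => sid | some m => if sid < m then sid else m),
     some (match st.2.2 with | none => sid | some m => if sid > m then sid else m))
  else st

def sources_signature_py_alt (sources_list : List (List (String × Int))) : Int × Int × Int :=
  if sources_list = [] then (0, 0, 0)
  else
    let st := sources_list.foldl altStep (0, none, none)
    if st.1 = 0 then (0, 0, 0)
    else (st.1, st.2.1.getD 0, st.2.2.getD 0)

-- ===== PRECONDITION & SPEC =====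
def Spec_sources_signature_py (sources_list : List (List (String × Int))) (out : Int × Int × Int) : Prop := out = sources_signature_py_alt sources_list
instance (sources_list : List (List (String × Int))) (out : Int × Int × Int) : Decidable (Spec_sources_signature_py sources_list out) := by unfold Spec_sources_signature_py; infer_instance

-- ===== CLAIM (what is proved, stated in full; the proofs are below) =====
def Claim_equal_sources_signature_py : Prop := ∀ (sources_list : List (List (String × Int))), Dom_sources_signature_py sources_list → Spec_sources_signature_py sources_list (sources_signature_py sources_list)

-- ===== LEMMAS AND PROOFS =====
-- the state B maintains, expressed from the list A collects
def stOf (xs : List Int) : Int × Option Int × Option Int :=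
  ((xs.length : Int), PySem.List.min? xs (fun x => x), PySem.List.max? xs (fun x => x))

theorem min?_id_append (xs : List Int) (a : Int) :
    PySem.List.min? (xs ++ [a]) (fun x => x) =
      some (match PySem.List.min? xs (fun x => x) with | none => a | some m => min m a) := by
  cases xs with
  | nil => simp [PySem.List.min?]
  | cons x t =>
    rw [List.cons_append, PySem.List.min?_id_cons, PySem.List.min?_id_cons]
    simp [List.foldl_append]

theorem max?_id_append (xs : List Int) (a : Int) :
    PySem.List.max? (xs ++ [a]) (fun x => x) =
      some (match PySem.List.max? xs (fun x => x) with | none => a | some m => max m a) := by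
  cases xs with
  | nil => simp [PySem.List.max?]
  | cons x t =>
    rw [List.cons_append, PySem.List.max?_id_cons, PySem.List.max?_id_cons]
    simp [List.foldl_append]

theorem altStep_stOf (xs : List Int) (row : List (String × Int)) :
    altStep (stOf xs) row =
      stOf (if sidOfRow row > 0 then xs ++ [sidOfRow row] else xs) := by
  by_cases h : sidOfRow row > 0
  · simp only [altStep, stOf, h, if_pos, min?_id_append, max?_id_append,
      Prod.mk.injEq]
    refine ⟨?_, ?_, ?_⟩
    · simp
    · cases hm : PySem.List.min? xs (fun x => x) <;>
        simp [min_def] <;> split_ifs <;> omega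
    · cases hM : PySem.List.max? xs (fun x => x) <;>
        simp [max_def] <;> split_ifs <;> omega
  · simp [altStep, stOf, h]

theorem fold_inv (rows : List (List (String × Int))) (xs : List Int) :
    rows.foldl altStep (stOf xs) =
      stOf (rows.foldl
        (fun acc row =>
          let sid := sidOfRow row
          if sid > 0 then acc ++ [sid] else acc) xs) := by
  induction rows generalizing xs with
  | nil => rfl
  | cons r rs ih =>
    simp only [List.foldl_cons, altStep_stOf]
    exact ih _

-- ===== VERDICT (by name: the statement is the Claim_ definition above) =====
theorem sources_signature_py_spec : Claim_equal_sources_signature_py := by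
  intro l _
  unfold Spec_sources_signature_py sources_signature_py sources_signature_py_alt
  by_cases hl : l = []
  · simp [hl]
  · simp only [hl, if_false]
    have hfold : l.foldl altStep (0, none, none) =
        stOf (l.foldl
          (fun acc row =>
            let sid := sidOfRow row
            if sid > 0 then acc ++ [sid] else acc) []) := by
      have := fold_inv l []
      simpa [stOf, PySem.List.min?, PySem.List.max?] using this
    set sids := l.foldl
      (fun acc row =>
        let sid := sidOfRow row
        if sid > 0 then acc ++ [sid] else acc) [] with hsids
    rw [hfold]
    by_cases hs : sids = []
    · simp [hs, stOf, PySem.List.min?, PySem.List.max?]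
    · have hc : (sids.length : Int) ≠ 0 := by
        intro h
        have h0 : sids.length = 0 := by exact_mod_cast h
        exact hs (List.length_eq_zero_iff.mp h0)
      obtain ⟨mn, hmn⟩ : ∃ m, PySem.List.min? sids (fun x => x) = some m := by
        cases h : PySem.List.min? sids (fun x => x) with
        | none => exact absurd ((PySem.List.min?_eq_none_iff sids _).mp h) hs
        | some m => exact ⟨m, rfl⟩
      obtain ⟨mx, hmx⟩ : ∃ m, PySem.List.max? sids (fun x => x) = some m := by
        cases h : PySem.List.max? sids (fun x => x) with
        | none => exact absurd ((PySem.List.max?_eq_none_iff sids _).mp h) hs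
        | some m => exact ⟨m, rfl⟩
      simp [hs, stOf, hmn, hmx]
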